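-- pv_equiv track=rewrite | github.com/kritishmohapatra/GFG_SOLUTIONS | Difficulty: Medium/Check if frequencies can be equal/check-if-frequencies-can-be-equal.py | sameFreq
-- ===== SOURCE A (Python) =====
-- def sameFreq(s: str) -> bool:
--     #code here
--     arr=[0]*26
--     for c in s:
--         arr[ord(c)-ord("a")]+=1
--     mp={}
--     for char in arr:
--         if char>0:
--             mp[char]=mp.get(char, 0)+1
--     if len(mp)==1:
--         return True
--     if len(mp)!=2:
--         return False
--     mp=list(mp.items())
--     f1=mp[0][0]
--     f2=mp[1][0]
--     c1=mp[0][1]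
--     c2=mp[1][1]
--     if f1==1 and c1==1:
--         return True
--     if f2==1 and c2==1:
--         return True
--     if (abs(f1-f2)==1) and ((f1>f2 and c1==1) or (f2>f1 and c2==1)):
--         return True
--     return False
-- ===== SOURCE B (Python) =====
-- def sameFreq(s: str) -> bool:
--     arr = [0] * 26
--     for c in s:
--         arr[ord(c) - ord("a")] += 1
--     counts = [x for x in arr if x > 0]
--     k = len(counts)
--     if k == 0:
--         return False
--     total = sum(counts)
--     m = min(counts)
--     M = max(counts)
--     return M == m or (m == 1 and total - 1 == M * (k - 1)) or (M == m + 1 and total == m * k + 1)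
-- ===== Notes on version B (the rewrite author's own statement) =====
-- stated objective: simpler
-- what changed: A builds a frequency-of-frequencies dict and does a four-way case analysis on its two entries; B replaces all of that by an arithmetic criterion on the positive counts (all equal, or min==1 with sum-1==max*(k-1), or max==min+1 with sum==min*k+1) computed from min/max/sum/length in one pass over the 26 counts.
import Mathlib
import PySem

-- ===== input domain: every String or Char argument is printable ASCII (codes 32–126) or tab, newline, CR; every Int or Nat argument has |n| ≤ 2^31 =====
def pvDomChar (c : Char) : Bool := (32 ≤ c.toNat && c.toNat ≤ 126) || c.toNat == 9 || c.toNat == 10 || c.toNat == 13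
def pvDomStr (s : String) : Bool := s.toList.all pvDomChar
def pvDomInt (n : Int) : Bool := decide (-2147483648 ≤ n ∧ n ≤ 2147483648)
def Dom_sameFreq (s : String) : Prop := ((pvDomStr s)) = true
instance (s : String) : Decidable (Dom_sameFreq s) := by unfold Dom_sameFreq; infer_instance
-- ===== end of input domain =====

-- B replaces A's frequency-of-frequencies dict and its four-way case analysis by an arithmetic
-- criterion on the positive counts (min, max, sum, length); objective: simpler, not faster.

-- ===== PORT A =====
-- Python `arr[ord(c)-ord("a")] += 1`: negative indices wrap from the end (exact for
-- -26 ≤ i < 26, which Pre_ guarantees; outside that range Python raises IndexError).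
-- This counting loop is textually identical in A and in B, so both ports share it.
def pvCountArr (s : String) : List Int :=
  s.toList.foldl
    (fun arr c =>
      let i : Int := (c.toNat : Int) - 97
      let j : Nat := if i < 0 then (i + 26).toNat else i.toNat
      arr.set j (arr.getD j 0 + 1))
    (List.replicate 26 (0 : Int))

def sameFreq (s : String) : Bool :=
  let arr := pvCountArr s
  let mp := arr.foldl (fun d x => if 0 < x then d.insert x (d.getD x 0 + 1) else d)
              (PySem.Dict.empty : PySem.Dict Int Int)
  if mp.size == 1 then true
  else if ¬ mp.size = 2 then false
  else
    -- size = 2, so mp.items has exactly the two entries read below (mp[0], mp[1])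
    match mp.items with
    | (f1, c1) :: (f2, c2) :: _ =>
      (f1 == 1 && c1 == 1) || (f2 == 1 && c2 == 1) ||
        ((f1 - f2).natAbs == 1 &&
          ((decide (f2 < f1) && c1 == 1) || (decide (f1 < f2) && c2 == 1)))
    | _ => false  -- unreachable: size = 2

-- ===== PORT B =====
def sameFreq_alt (s : String) : Bool :=
  let arr := pvCountArr s
  let counts := arr.filter (fun x => decide (0 < x))
  let k : Int := (counts.length : Int)
  if k == 0 then false
  else
    let total := counts.sum
    -- min/max of a nonempty list (Python min/max; guarded by k ≠ 0)
    match PySem.List.min? counts id, PySem.List.max? counts id with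
    | some m, some M =>
        M == m || (m == 1 && total - 1 == M * (k - 1)) || (M == m + 1 && total == m * k + 1)
    | _, _ => false

-- ===== PRECONDITION & SPEC =====
-- Pre_ admits exactly the strings on which A returns: any character with code outside
-- [71, 122] makes `arr[ord(c)-97]` raise IndexError in Python (index < -26 or ≥ 26).
def Pre_sameFreq (s : String) : Prop :=
  (s.toList.all (fun c => 71 ≤ c.toNat && c.toNat ≤ 122)) = true
instance (s : String) : Decidable (Pre_sameFreq s) := by unfold Pre_sameFreq; infer_instance
def pvWitness_sameFreq : String := "aabbc"

def Spec_sameFreq (s : String) (out : Bool) : Prop := out = sameFreq_alt s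
instance (s : String) (out : Bool) : Decidable (Spec_sameFreq s out) := by unfold Spec_sameFreq; infer_instance

-- ===== CLAIM (what is proved, stated in full; the proofs are below) =====
def Claim_equal_sameFreq : Prop := ∀ (s : String), Dom_sameFreq s → Pre_sameFreq s → Spec_sameFreq s (sameFreq s)

-- ===== LEMMAS AND PROOFS =====

-- a fold of the min?/max? shape started at `some a` stays `some _`
lemma pvFoldlOptIsSome (f : Option Int → Int → Option Int)
    (hf : ∀ a x, (f (some a) x).isSome) (l : List Int) (a : Int) :
    (l.foldl f (some a)).isSome := by
  induction l generalizing a with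
  | nil => simp
  | cons x t ih =>
    have := hf a x
    rcases Option.isSome_iff_exists.mp this with ⟨b, hb⟩
    simp only [List.foldl_cons, hb]
    exact ih b

lemma pvMinIsSome (x : Int) (t : List Int) : (PySem.List.min? (x :: t) id).isSome := by
  simp only [PySem.List.min?, List.foldl_cons]
  exact pvFoldlOptIsSome _ (by intro a y; dsimp only; split <;> simp) t x

lemma pvMaxIsSome (x : Int) (t : List Int) : (PySem.List.max? (x :: t) id).isSome := by
  simp only [PySem.List.max?, List.foldl_cons]
  exact pvFoldlOptIsSome _ (by intro a y; dsimp only; split <;> simp) t x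

lemma pvSumLe (l : List Int) (M : Int) (h : ∀ x ∈ l, x ≤ M) :
    l.sum ≤ M * l.length := by
  induction l with
  | nil => simp
  | cons x t ih =>
    have hx := h x (by simp)
    have ht := ih (fun y hy => h y (by simp [hy]))
    simp only [List.sum_cons, List.length_cons]
    push_cast
    nlinarith

lemma pvSumLeOne (l : List Int) (M a : Int) (h : ∀ x ∈ l, x ≤ M) (ha : a ∈ l) :
    l.sum + (M - a) ≤ M * l.length := by
  induction l with
  | nil => simp at ha
  | cons x t ih =>
    simp only [List.sum_cons, List.length_cons]
    push_cast
    have hxM := h x (by simp)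
    by_cases hxa : x = a
    · subst hxa
      have := pvSumLe t M (fun y hy => h y (by simp [hy]))
      nlinarith
    · have hat : a ∈ t := by
        rcases List.mem_cons.mp ha with h' | h'
        · exact absurd h'.symm hxa
        · exact h'
      have := ih (fun y hy => h y (by simp [hy])) hat
      nlinarith

lemma pvSumLeTwo (l : List Int) (M a b : Int) (h : ∀ x ∈ l, x ≤ M)
    (ha : a ∈ l) (hb : b ∈ l) (hab : a ≠ b) :
    l.sum + (M - a) + (M - b) ≤ M * l.length := by
  induction l with
  | nil => simp at ha
  | cons x t ih =>
    simp only [List.sum_cons, List.length_cons]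
    push_cast
    have hxM := h x (by simp)
    by_cases hxa : x = a
    · subst hxa
      have hbt : b ∈ t := by
        rcases List.mem_cons.mp hb with h' | h'
        · exact absurd h'.symm hab
        · exact h'
      have := pvSumLeOne t M b (fun y hy => h y (by simp [hy])) hbt
      nlinarith
    · by_cases hxb : x = b
      · subst hxb
        have hat : a ∈ t := by
          rcases List.mem_cons.mp ha with h' | h'
          · exact absurd h' hab
          · exact h'
        have := pvSumLeOne t M a (fun y hy => h y (by simp [hy])) hat
        nlinarith
      · have hat : a ∈ t := by
          rcases List.mem_cons.mp ha with h' | h'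
          · exact absurd h'.symm hxa
          · exact h'
        have hbt : b ∈ t := by
          rcases List.mem_cons.mp hb with h' | h'
          · exact absurd h'.symm hxb
          · exact h'
        have := ih (fun y hy => h y (by simp [hy])) hat hbt
        nlinarith

lemma pvLenCount (l : List Int) (a b : Int) (hab : a ≠ b)
    (h : ∀ x ∈ l, x = a ∨ x = b) :
    (l.length : Int) = l.count a + l.count b := by
  induction l with
  | nil => simp
  | cons x t ih =>
    have ht := ih (fun y hy => h y (by simp [hy]))
    rcases h x (by simp) with hx | hx <;> subst hx
    · have hxb : (x == b) = false := by simpa using hab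
      simp only [List.length_cons, List.count_cons, beq_self_eq_true, hxb, if_true]
      push_cast
      omega
    · have hxa : (x == a) = false := by simpa using Ne.symm hab
      simp only [List.length_cons, List.count_cons, beq_self_eq_true, hxa, if_true]
      push_cast
      omega

lemma pvSumCount (l : List Int) (a b : Int) (hab : a ≠ b)
    (h : ∀ x ∈ l, x = a ∨ x = b) :
    l.sum = a * l.count a + b * l.count b := by
  induction l with
  | nil => simp
  | cons x t ih =>
    have ht := ih (fun y hy => h y (by simp [hy]))
    rcases h x (by simp) with hx | hx <;> subst hx
    · have hxb : (x == b) = false := by simpa using hab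
      simp only [List.sum_cons, List.count_cons, beq_self_eq_true, hxb, if_true, ht]
      push_cast
      ring
    · have hxa : (x == a) = false := by simpa using Ne.symm hab
      simp only [List.sum_cons, List.count_cons, beq_self_eq_true, hxa, if_true, ht]
      push_cast
      ring

-- the two-distinct-values case, as a Prop-level iff (a < b; counts ca, cb ≥ 1)
lemma pvCond2 (a b ca cb : Int) (ha1 : 1 ≤ a) (hlt : a < b) (hca : 1 ≤ ca) (hcb : 1 ≤ cb) :
    (((a = 1 ∧ ca = 1) ∨ (b = 1 ∧ cb = 1)) ∨
      ((a - b).natAbs = 1 ∧ ((b < a ∧ ca = 1) ∨ (a < b ∧ cb = 1)))) ↔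
    ((a = 1 ∧ a * ca + b * cb - 1 = b * (ca + cb - 1)) ∨
      (b = a + 1 ∧ a * ca + b * cb = a * (ca + cb) + 1)) := by
  have hb2 : 2 ≤ b := by omega
  constructor
  · rintro ((⟨rfl, rfl⟩ | ⟨rfl, _⟩) | ⟨habs, (⟨h1, _⟩ | ⟨_, rfl⟩)⟩)
    · exact Or.inl ⟨rfl, by ring⟩
    · omega
    · omega
    · right
      refine ⟨by omega, by rw [show b = a + 1 by omega]; ring⟩
  · rintro (⟨rfl, heq⟩ | ⟨rfl, heq⟩)
    · have hfac : (b - 1) * (ca - 1) = 0 := by nlinarith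
      rcases mul_eq_zero.mp hfac with h | h
      · omega
      · exact Or.inl (Or.inl ⟨rfl, by omega⟩)
    · have hcb1 : cb = 1 := by nlinarith
      exact Or.inr ⟨by omega, Or.inr ⟨by omega, hcb1⟩⟩

-- the heart of the file: A's decision and B's decision agree on ANY count array
set_option maxHeartbeats 1000000 in
lemma pvTail_eq (arr : List Int) :
    (let mp := arr.foldl (fun d x => if 0 < x then d.insert x (d.getD x 0 + 1) else d)
                 (PySem.Dict.empty : PySem.Dict Int Int)
     if mp.size == 1 then true
     else if ¬ mp.size = 2 then false
     else
       match mp.items with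
       | (f1, c1) :: (f2, c2) :: _ =>
         (f1 == 1 && c1 == 1) || (f2 == 1 && c2 == 1) ||
           ((f1 - f2).natAbs == 1 &&
             ((decide (f2 < f1) && c1 == 1) || (decide (f1 < f2) && c2 == 1)))
       | _ => false) =
    (let counts := arr.filter (fun x => decide (0 < x))
     let k : Int := (counts.length : Int)
     if k == 0 then false
     else
       let total := counts.sum
       match PySem.List.min? counts id, PySem.List.max? counts id with
       | some m, some M =>
           M == m || (m == 1 && total - 1 == M * (k - 1)) ||
             (M == m + 1 && total == m * k + 1)
       | _, _ => false) := by
  have hmp : arr.foldl (fun d x => if 0 < x then d.insert x (d.getD x 0 + 1) else d)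
      (PySem.Dict.empty : PySem.Dict Int Int)
      = PySem.Dict.counter (arr.filter (fun x => decide (0 < x))) := by
    rw [← PySem.Dict.foldl_insert_getD_add_one_eq_counter, List.foldl_filter]
    simp
  simp only [hmp]
  set l := arr.filter (fun x => decide (0 < x)) with hl
  have hpos : ∀ x ∈ l, 1 ≤ x := by
    intro x hx
    have := List.of_mem_filter hx
    simp at this
    omega
  have hitems : (PySem.Dict.counter l).items
      = (PySem.Set.ofList l).map (fun k => (k, (l.count k : Int))) :=
    PySem.Dict.items_counter l
  have hsize : (PySem.Dict.counter l).size = (PySem.Set.ofList l).length := by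
    simp [PySem.Dict.size, hitems]
  have hmem : ∀ x, x ∈ PySem.Set.ofList l ↔ x ∈ l := fun x => PySem.Set.mem_ofList l x
  have hnd : (PySem.Set.ofList l).Nodup := PySem.Set.nodup_ofList l
  have hminmax : l ≠ [] → ∃ m M, PySem.List.min? l id = some m ∧ PySem.List.max? l id = some M := by
    intro hne
    match l, hne with
    | x :: t, _ =>
      rcases Option.isSome_iff_exists.mp (pvMinIsSome x t) with ⟨m, hm⟩
      rcases Option.isSome_iff_exists.mp (pvMaxIsSome x t) with ⟨M, hM⟩
      exact ⟨m, M, hm, hM⟩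
  rcases hDeq : PySem.Set.ofList l with _ | ⟨a, _ | ⟨b, _ | ⟨c, rest⟩⟩⟩
  · -- no positive count: l = []; A returns False (len(mp)=0), B returns False (k=0)
    have hlnil : l = [] := by
      rcases hlc : l with _ | ⟨x, t⟩
      · rfl
      · exfalso
        have hx : x ∈ l := by rw [hlc]; simp
        have := (hmem x).mpr hx
        rw [hDeq] at this
        simp at this
    rw [hDeq] at hsize
    simp [hlnil]
    decide
  · -- one distinct positive count: A returns True; B: min = max
    rw [hDeq] at hmem hsize
    have hal : a ∈ l := (hmem a).mp (by simp)
    have hone : ∀ x ∈ l, x = a := by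
      intro x hx
      have := (hmem x).mpr hx
      simpa using this
    have hlne : l ≠ [] := by intro h; rw [h] at hal; simp at hal
    rcases hminmax hlne with ⟨m, M, hm, hM⟩
    have hmema : m = a := hone m (PySem.List.min?_mem hm)
    have hMema : M = a := hone M (PySem.List.max?_mem hM)
    have hk : ((l.length : Int) == 0) = false := by
      simp only [beq_eq_false_iff_ne, ne_eq, Nat.cast_eq_zero, List.length_eq_zero_iff]
      exact hlne
    simp [hsize, hk, hm, hM, hmema, hMema]
  · -- two distinct positive counts a, b
    rw [hDeq] at hmem hsize hitems hnd
    have hab : a ≠ b := by simp at hnd; exact hnd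
    have hal : a ∈ l := (hmem a).mp (by simp)
    have hbl : b ∈ l := (hmem b).mp (by simp)
    have htwo : ∀ x ∈ l, x = a ∨ x = b := by
      intro x hx
      have := (hmem x).mpr hx
      simpa using this
    have hlne : l ≠ [] := by intro h; rw [h] at hal; simp at hal
    rcases hminmax hlne with ⟨m, M, hm, hM⟩
    have hmmem := PySem.List.min?_mem hm
    have hMmem := PySem.List.max?_mem hM
    have hmle : ∀ y ∈ l, m ≤ y := fun y hy => PySem.List.min?_isMin hm y hy
    have hMge : ∀ y ∈ l, y ≤ M := fun y hy => PySem.List.max?_isMax hM y hy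
    have ha1 : 1 ≤ a := hpos a hal
    have hb1 : 1 ≤ b := hpos b hbl
    have hca : 1 ≤ (l.count a : Int) := by
      have := List.count_pos_iff.mpr hal
      omega
    have hcb : 1 ≤ (l.count b : Int) := by
      have := List.count_pos_iff.mpr hbl
      omega
    have hsum := pvSumCount l a b hab htwo
    have hlen := pvLenCount l a b hab htwo
    have hk : ((l.length : Int) == 0) = false := by
      simp only [beq_eq_false_iff_ne, ne_eq, Nat.cast_eq_zero, List.length_eq_zero_iff]
      exact hlne
    have hsz2 : (PySem.Dict.counter l).size = 2 := by rw [hsize]; rfl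
    rw [Bool.eq_iff_iff]
    simp [hsz2, hitems, hk, hm, hM]
    have hcaz : (l.count a = 1) ↔ ((l.count a : Int) = 1) := by omega
    have hcbz : (l.count b = 1) ↔ ((l.count b : Int) = 1) := by omega
    simp only [hcaz, hcbz]
    rcases lt_trichotomy a b with hlt | heq | hlt
    · have hma : m = a := by
        rcases htwo m hmmem with h | h
        · exact h
        · have := hmle a hal; omega
      have hMb : M = b := by
        rcases htwo M hMmem with h | h
        · have := hMge b hbl; omega
        · exact h
      rw [hma, hMb, hsum, hlen]
      have hba : (b = a) ↔ False := by constructor <;> intro h <;> [exact hab h.symm; exact h.elim]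
      rw [hba, false_or]
      exact pvCond2 a b (l.count a) (l.count b) ha1 hlt hca hcb
    · exact absurd heq hab
    · have hma : m = b := by
        rcases htwo m hmmem with h | h
        · have := hmle b hbl; omega
        · exact h
      have hMb : M = a := by
        rcases htwo M hMmem with h | h
        · exact h
        · have := hMge a hal; omega
      have hsum2 := pvSumCount l b a (Ne.symm hab) (fun x hx => (htwo x hx).symm)
      have hlen2 := pvLenCount l b a (Ne.symm hab) (fun x hx => (htwo x hx).symm)
      rw [hma, hMb, hsum2, hlen2]
      have hba : (a = b) ↔ False := by constructor <;> intro h <;> [exact hab h; exact h.elim]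
      have hns : ((a - b).natAbs = 1) ↔ ((b - a).natAbs = 1) := by omega
      rw [hba, false_or, hns]
      have hiff := pvCond2 b a (l.count b) (l.count a) hb1 hlt hcb hca
      constructor
      · rintro ((h | h) | ⟨hn, (h | h)⟩)
        · exact hiff.mp (Or.inl (Or.inr h))
        · exact hiff.mp (Or.inl (Or.inl h))
        · exact hiff.mp (Or.inr ⟨hn, Or.inr h⟩)
        · exact hiff.mp (Or.inr ⟨hn, Or.inl h⟩)
      · intro h
        rcases hiff.mpr h with (h | h) | ⟨hn, (h | h)⟩
        · exact Or.inl (Or.inr h)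
        · exact Or.inl (Or.inl h)
        · exact Or.inr ⟨hn, Or.inr h⟩
        · exact Or.inr ⟨hn, Or.inl h⟩
  · -- three or more distinct positive counts: both sides False
    rw [hDeq] at hmem hsize hnd
    have hal : a ∈ l := (hmem a).mp (by simp)
    have hbl : b ∈ l := (hmem b).mp (by simp)
    have hcl : c ∈ l := (hmem c).mp (by simp)
    have hab : a ≠ b := by simp [List.nodup_cons] at hnd; tauto
    have hac : a ≠ c := by simp [List.nodup_cons] at hnd; tauto
    have hbc : b ≠ c := by simp [List.nodup_cons] at hnd; tauto
    have hlne : l ≠ [] := by intro h; rw [h] at hal; simp at hal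
    rcases hminmax hlne with ⟨m, M, hm, hM⟩
    have hmle : ∀ y ∈ l, m ≤ y := fun y hy => PySem.List.min?_isMin hm y hy
    have hMge : ∀ y ∈ l, y ≤ M := fun y hy => PySem.List.max?_isMax hM y hy
    have hmM : m + 2 ≤ M := by
      have h1 := hmle a hal; have h2 := hmle b hbl; have h3 := hmle c hcl
      have h4 := hMge a hal; have h5 := hMge b hbl; have h6 := hMge c hcl
      omega
    have hmmem := PySem.List.min?_mem hm
    have hk : ((l.length : Int) == 0) = false := by
      simp only [beq_eq_false_iff_ne, ne_eq, Nat.cast_eq_zero, List.length_eq_zero_iff]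
      exact hlne
    have hnotb : ¬ (m = 1 ∧ l.sum - 1 = M * ((l.length : Int) - 1)) := by
      rintro ⟨hm1, hsum1⟩
      have hv : ∃ v, v ∈ l ∧ v ≠ m ∧ v ≠ M := by
        by_cases h1 : a = m ∨ a = M
        · by_cases h2 : b = m ∨ b = M
          · refine ⟨c, hcl, ?_, ?_⟩ <;> rcases h1 with h1 | h1 <;> rcases h2 with h2 | h2 <;> omega
          · push Not at h2
            exact ⟨b, hbl, h2.1, h2.2⟩
        · push Not at h1
          exact ⟨a, hal, h1.1, h1.2⟩
      rcases hv with ⟨v, hvl, hvm, hvM⟩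
      have hle := pvSumLeTwo l M m v hMge hmmem hvl (Ne.symm hvm)
      have hvlt : v < M := lt_of_le_of_ne (hMge v hvl) hvM
      have hexp : M * ((l.length : Int) - 1) = M * (l.length : Int) - M := by ring
      linarith
    have hs1 : ¬ (PySem.Dict.counter l).size = 1 := by
      rw [hsize]; simp only [List.length_cons]; omega
    have hs2 : ¬ (PySem.Dict.counter l).size = 2 := by
      rw [hsize]; simp only [List.length_cons]; omega
    have hg1 : ¬ M = m := by omega
    have hg3 : ¬ M = m + 1 := by omega
    rw [Bool.eq_iff_iff]
    simp [hs1, hs2, hk, hm, hM, hg1, hg3, hnotb]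

-- ===== VERDICT (by name: the statement is the Claim_ definition above) =====
theorem sameFreq_spec : Claim_equal_sameFreq := by
  intro s _ _
  show sameFreq s = sameFreq_alt s
  unfold sameFreq sameFreq_alt
  exact pvTail_eq (pvCountArr s)
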